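-- pv_equiv track=rewrite | github.com/davidassist/garage-reg | backend/app/services/notifications/email_service.py | _mjml_to_html
-- ===== SOURCE A (Python) =====
-- def _mjml_to_html(mjml_content: str) -> str:
--     """
--     Convert MJML to HTML
--
--     In production, use:
--     - mjml-python package
--     - MJML API service
--     - Pre-compiled templates
--     """
--     # Simplified MJML to HTML conversion
--     # Replace MJML tags with HTML equivalents
--     html = mjml_content
--
--     # Basic MJML tag replacements
--     replacements = {
--         '<mjml>': '<!DOCTYPE html><html>',
--         '</mjml>': '</html>',
--         '<mj-head>': '<head>',
--         '</mj-head>': '</head>',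
--         '<mj-body>': '<body style="margin:0;padding:0;background-color:#f4f4f4;">',
--         '</mj-body>': '</body>',
--         '<mj-section>': '<table width="100%" cellpadding="0" cellspacing="0"><tr><td align="center">',
--         '</mj-section>': '</td></tr></table>',
--         '<mj-column>': '<div style="display:inline-block;vertical-align:top;width:100%;">',
--         '</mj-column>': '</div>',
--         '<mj-text': '<div',
--         '</mj-text>': '</div>',
--         '<mj-button': '<a',
--         '</mj-button>': '</a>',
--         '<mj-divider/>': '<hr style="border:none;border-top:1px solid #ccc;margin:20px 0;">',
--     }
--
--     for mjml_tag, html_tag in replacements.items():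
--         html = html.replace(mjml_tag, html_tag)
--
--     return html
-- ===== SOURCE B (Python) =====
-- # Split the input once on the tag-opening angle bracket and classify each
-- # chunk by the tag table
-- # (keys stored without their leading '<'), instead of A's fifteen sequential
-- # full-string str.replace passes.
--
-- _TABLE = [
--     ('mjml>', '<!DOCTYPE html><html>'),
--     ('/mjml>', '</html>'),
--     ('mj-head>', '<head>'),
--     ('/mj-head>', '</head>'),
--     ('mj-body>', '<body style="margin:0;padding:0;background-color:#f4f4f4;">'),
--     ('/mj-body>', '</body>'),
--     ('mj-section>', '<table width="100%" cellpadding="0" cellspacing="0"><tr><td align="center">'),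
--     ('/mj-section>', '</td></tr></table>'),
--     ('mj-column>', '<div style="display:inline-block;vertical-align:top;width:100%;">'),
--     ('/mj-column>', '</div>'),
--     ('mj-text', '<div'),
--     ('/mj-text>', '</div>'),
--     ('mj-button', '<a'),
--     ('/mj-button>', '</a>'),
--     ('mj-divider/>', '<hr style="border:none;border-top:1px solid #ccc;margin:20px 0;">'),
-- ]
--
--
-- def _mjml_to_html(mjml_content: str) -> str:
--     """Convert MJML to HTML (split on '<', classify each chunk)."""
--     chunks = mjml_content.split('<')
--     parts = [chunks[0]]
--     for chunk in chunks[1:]: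
--         for key, val in _TABLE:
--             if chunk.startswith(key):
--                 parts.append(val + chunk[len(key):])
--                 break
--         else:
--             parts.append('<' + chunk)
--     return ''.join(parts)
-- ===== Notes on version B (the rewrite author's own statement) =====
-- stated objective: alternative
-- what changed: B splits the input once on the tag-opening angle bracket and classifies each resulting chunk against a table of tag bodies (keys stored without their leading angle bracket), rebuilding the output in one pass, instead of A's fifteen sequential full-string str.replace passes.
import Mathlib
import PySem

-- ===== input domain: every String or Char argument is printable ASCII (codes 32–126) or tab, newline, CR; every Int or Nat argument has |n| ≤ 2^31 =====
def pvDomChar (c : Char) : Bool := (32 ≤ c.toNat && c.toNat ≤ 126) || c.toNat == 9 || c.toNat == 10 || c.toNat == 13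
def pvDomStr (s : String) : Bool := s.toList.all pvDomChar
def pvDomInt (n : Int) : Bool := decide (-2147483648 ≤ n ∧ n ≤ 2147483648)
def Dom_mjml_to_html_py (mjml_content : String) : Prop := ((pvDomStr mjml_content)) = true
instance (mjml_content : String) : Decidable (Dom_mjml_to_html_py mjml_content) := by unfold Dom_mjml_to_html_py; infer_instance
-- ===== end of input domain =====

-- B splits the input once on the tag-opening angle bracket and classifies each
-- chunk against a table of tag bodies (keys without their leading bracket),
-- instead of A's fifteen sequential full-string str.replace passes
-- (alternative decomposition).

-- ===== PORT A =====
-- the dict literal `replacements` (distinct keys, insertion order)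
def pyReplacements : List (String × String) := [
  ("<mjml>", "<!DOCTYPE html><html>"),
  ("</mjml>", "</html>"),
  ("<mj-head>", "<head>"),
  ("</mj-head>", "</head>"),
  ("<mj-body>", "<body style=\"margin:0;padding:0;background-color:#f4f4f4;\">"),
  ("</mj-body>", "</body>"),
  ("<mj-section>", "<table width=\"100%\" cellpadding=\"0\" cellspacing=\"0\"><tr><td align=\"center\">"),
  ("</mj-section>", "</td></tr></table>"),
  ("<mj-column>", "<div style=\"display:inline-block;vertical-align:top;width:100%;\">"),
  ("</mj-column>", "</div>"),
  ("<mj-text", "<div"),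
  ("</mj-text>", "</div>"),
  ("<mj-button", "<a"),
  ("</mj-button>", "</a>"),
  ("<mj-divider/>", "<hr style=\"border:none;border-top:1px solid #ccc;margin:20px 0;\">")]

-- `for mjml_tag, html_tag in replacements.items(): html = html.replace(mjml_tag, html_tag)`
def mjml_to_html_py (mjml_content : String) : String :=
  pyReplacements.foldl (fun html p => PySem.Str.replace html p.1 p.2) mjml_content

-- ===== PORT B =====
-- Source B's _TABLE: tag bodies (tags minus their leading '<') with their HTML
def altTable : List (List Char × List Char) := [
  ("mjml>".toList, "<!DOCTYPE html><html>".toList),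
  ("/mjml>".toList, "</html>".toList),
  ("mj-head>".toList, "<head>".toList),
  ("/mj-head>".toList, "</head>".toList),
  ("mj-body>".toList, "<body style=\"margin:0;padding:0;background-color:#f4f4f4;\">".toList),
  ("/mj-body>".toList, "</body>".toList),
  ("mj-section>".toList, "<table width=\"100%\" cellpadding=\"0\" cellspacing=\"0\"><tr><td align=\"center\">".toList),
  ("/mj-section>".toList, "</td></tr></table>".toList),
  ("mj-column>".toList, "<div style=\"display:inline-block;vertical-align:top;width:100%;\">".toList),
  ("/mj-column>".toList, "</div>".toList),
  ("mj-text".toList, "<div".toList),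
  ("/mj-text>".toList, "</div>".toList),
  ("mj-button".toList, "<a".toList),
  ("/mj-button>".toList, "</a>".toList),
  ("mj-divider/>".toList, "<hr style=\"border:none;border-top:1px solid #ccc;margin:20px 0;\">".toList)]

-- Source B's inner `for key, val in _TABLE: if chunk.startswith(key): … break / else: …`
-- (`find?` = the first table entry whose key the chunk starts with;
--  `chunk[len(key):]` with its nonnegative start is `PySem.List.slice`)
def classifyChunk (chunk : List Char) : List Char :=
  match altTable.find? (fun p => PySem.Chars.startswith chunk p.1) with
  | some p => p.2 ++ PySem.List.slice chunk (some (p.1.length : Int)) none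
  | none => '<' :: chunk

-- `chunks = s.split('<'); parts = [chunks[0]]; for chunk in chunks[1:]: …; ''.join(parts)`
def mjml_to_html_py_alt (mjml_content : String) : String :=
  match PySem.Chars.splitOn mjml_content.toList ['<'] with
  | [] => ""   -- unreachable: Python str.split never returns an empty list
  | first :: rest =>
      String.ofList (rest.foldl (fun parts chunk => parts ++ classifyChunk chunk) first)

-- ===== PRECONDITION & SPEC =====
def Spec_mjml_to_html_py (mjml_content : String) (out : String) : Prop := out = mjml_to_html_py_alt mjml_content
instance (mjml_content : String) (out : String) : Decidable (Spec_mjml_to_html_py mjml_content out) := by unfold Spec_mjml_to_html_py; infer_instance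

-- ===== CLAIM (what is proved, stated in full; the proofs are below) =====
def Claim_equal_mjml_to_html_py : Prop := ∀ (mjml_content : String), Dom_mjml_to_html_py mjml_content → Spec_mjml_to_html_py mjml_content (mjml_to_html_py mjml_content)

-- ===== LEMMAS AND PROOFS =====

-- str.replace old→new, written as the direct structural recursion (proved equal
-- to PySem.Chars.replace below)
def repOne (old new : List Char) : List Char → List Char
  | [] => []
  | c :: t => if old.isPrefixOf (c :: t) then new ++ repOne old new (List.drop (old.length - 1) t)
              else c :: repOne old new t
termination_by l => l.length
decreasing_by all_goals simp [List.length_drop]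

-- a reference single left-to-right scan over a full-tag table (proof device
-- linking A's sequential passes with B's chunk classification)
def scanT (T : List (List Char × List Char)) : List Char → List Char
  | [] => []
  | c :: t =>
    match T.find? (fun p => p.1.isPrefixOf (c :: t)) with
    | some p => p.2 ++ scanT T (List.drop (p.1.length - 1) t)
    | none => c :: scanT T t
termination_by l => l.length
decreasing_by all_goals simp [List.length_drop]

-- side conditions on a replacement table under which one scan = sequential passes:
-- every tag is nonempty with '<' only at its head, every replacement starts with '<',
-- tags are pairwise non-prefix, no tag overlaps a shifted tag or occurs in a
-- shifted replacement
def Conds (T : List (List Char × List Char)) : Prop :=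
  (∀ p ∈ T, p.1 ≠ [] ∧ '<' ∉ p.1.tail ∧ p.2.head? = some '<') ∧
  List.Pairwise (fun p q => ¬(p.1 <+: q.1) ∧ ¬(q.1 <+: p.1)) T ∧
  (∀ p ∈ T, ∀ q ∈ T, ∀ j, j < p.1.length → 0 < j →
      ¬(p.1.drop j <+: q.1) ∧ ¬(q.1 <+: p.1.drop j)) ∧
  (∀ p ∈ T, ∀ q ∈ T, ∀ j, j < p.2.length →
      ¬(p.2.drop j <+: q.1) ∧ ¬(q.1 <+: p.2.drop j))

theorem repOne_nil (old new : List Char) : repOne old new [] = [] := by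
  simp [repOne]

theorem repOne_cons (old new : List Char) (c : Char) (t : List Char) :
    repOne old new (c :: t) =
      if old.isPrefixOf (c :: t) then new ++ repOne old new (List.drop (old.length - 1) t)
      else c :: repOne old new t := by
  simp [repOne]

theorem scanT_cons (T : List (List Char × List Char)) (c : Char) (t : List Char) :
    scanT T (c :: t) =
      match T.find? (fun p => p.1.isPrefixOf (c :: t)) with
      | some p => p.2 ++ scanT T (List.drop (p.1.length - 1) t)
      | none => c :: scanT T t := by
  simp [scanT]

theorem scanT_nil_table : ∀ s : List Char, scanT [] s = s := by
  intro s
  induction s with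
  | nil => simp [scanT]
  | cons c t ih => rw [scanT_cons]; simp [ih]

theorem prefix_split {a w X : List Char} (h : a <+: w ++ X) : a <+: w ∨ w <+: a := by
  induction a generalizing w with
  | nil => exact Or.inl (List.nil_prefix)
  | cons c a' ih =>
    cases w with
    | nil => exact Or.inr (List.nil_prefix)
    | cons d w' =>
      rw [List.cons_append, List.cons_prefix_cons] at h
      rcases ih h.2 with h1 | h2
      · exact Or.inl (List.cons_prefix_cons.mpr ⟨h.1, h1⟩)
      · exact Or.inr (List.cons_prefix_cons.mpr ⟨h.1.symm, h2⟩)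

theorem find?_congr' {α : Type} {p q : α → Bool} :
    ∀ l : List α, (∀ x ∈ l, p x = q x) → l.find? p = l.find? q := by
  intro l
  induction l with
  | nil => intro _; rfl
  | cons a l ih =>
    intro h
    have ha := h a List.mem_cons_self
    rw [List.find?_cons, List.find?_cons, ha]
    cases q a
    · exact ih fun x hx => h x (List.mem_cons_of_mem _ hx)
    · rfl

-- scanT copies a block none of whose shifted suffixes is prefix-compatible with a tag
theorem scan_copy (T : List (List Char × List Char)) :
    ∀ (v X : List Char),
      (∀ q ∈ T, ∀ j, j < v.length → ¬(v.drop j <+: q.1) ∧ ¬(q.1 <+: v.drop j)) →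
      scanT T (v ++ X) = v ++ scanT T X := by
  intro v
  induction v with
  | nil => intro X _; simp
  | cons c v' ih =>
    intro X h
    have hnone : T.find? (fun p => p.1.isPrefixOf (c :: (v' ++ X))) = none := by
      rw [List.find?_eq_none]
      intro q hq hpre
      have hpre' : q.1 <+: (c :: v') ++ X := by
        rw [List.isPrefixOf_iff_prefix] at hpre
        simpa using hpre
      rcases prefix_split hpre' with h1 | h2
      · exact (h q hq 0 (by simp)).2 (by simpa using h1)
      · exact (h q hq 0 (by simp)).1 (by simpa using h2)
    rw [List.cons_append, scanT_cons, hnone]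
    rw [ih X (fun q hq j hj => by
      simpa using h q hq (j+1) (by simpa using hj))]
    simp

-- repOne copies a block in which the pattern matches at no shifted position
theorem rep_copy (k v : List Char) :
    ∀ (w X : List Char), (∀ j, j < w.length → ¬ k <+: (w ++ X).drop j) →
      repOne k v (w ++ X) = w ++ repOne k v X := by
  intro w
  induction w with
  | nil => intro X _; simp
  | cons c w' ih =>
    intro X h
    rw [List.cons_append, repOne_cons, if_neg ?hneg]
    case hneg =>
      intro hks
      exact h 0 (by simp) (by simpa using (List.isPrefixOf_iff_prefix).mp hks)
    rw [ih X (fun j hj => by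
      have := h (j+1) (by simpa using hj)
      simpa using this)]
    simp

theorem repOne_decomp (k v : List Char) (hk : k ≠ []) :
    ∀ t, repOne k v t = t ∨
      ∃ u t₂, t = u ++ k ++ t₂ ∧ repOne k v t = u ++ v ++ repOne k v t₂ := by
  intro t
  induction t with
  | nil => exact Or.inl (repOne_nil _ _)
  | cons c t' ih =>
    by_cases hks : k.isPrefixOf (c :: t')
    · right
      obtain ⟨t₂, ht₂⟩ := (List.isPrefixOf_iff_prefix).mp hks
      refine ⟨[], t₂, by simp [ht₂.symm], ?_⟩
      rw [repOne_cons, if_pos hks]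
      have hdrop : List.drop (k.length - 1) t' = t₂ := by
        cases k with
        | nil => exact absurd rfl hk
        | cons a k' =>
          rw [List.cons_append] at ht₂
          injection ht₂ with _ h2
          rw [← h2]
          simp
      rw [hdrop]; simp
    · rcases ih with hid | ⟨u, t₂, htu, hrep⟩
      · left; rw [repOne_cons, if_neg hks, hid]
      · right
        exact ⟨c :: u, t₂, by simp [htu], by rw [repOne_cons, if_neg hks, hrep]; simp⟩

-- PySem.Chars.replace (nonempty pattern) is repOne
theorem go_eq (old new : List Char) (hold : old ≠ []) :
    ∀ (fuel : Nat) (l acc : List Char), l.length ≤ fuel →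
      PySem.Chars.replace.go old new fuel l acc = acc.reverse ++ repOne old new l := by
  have holdlen : 0 < old.length := List.length_pos_of_ne_nil hold
  intro fuel
  induction fuel with
  | zero =>
    intro l acc hl
    have : l = [] := List.eq_nil_of_length_eq_zero (Nat.le_zero.mp hl)
    subst this
    rw [PySem.Chars.replace.go]
    simp [repOne_nil]
  | succ f ih =>
    intro l acc hl
    cases l with
    | nil =>
      rw [PySem.Chars.replace.go]
      · simp [repOne_nil]
      · omega
    | cons c t =>
      rw [PySem.Chars.replace.go]
      by_cases hks : old.isPrefixOf (c :: t)
      · rw [if_pos hks]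
        rw [ih _ _ (by simp [List.length_drop]; simp at hl; omega)]
        rw [repOne_cons, if_pos hks]
        have hdrop : List.drop old.length (c :: t) = List.drop (old.length - 1) t := by
          cases old with
          | nil => exact absurd rfl hold
          | cons a o' => simp [List.drop_succ_cons]
        rw [hdrop, List.reverse_append, List.reverse_reverse, List.append_assoc]
      · rw [if_neg hks]
        rw [ih t _ (by simp at hl; omega)]
        rw [repOne_cons, if_neg hks]
        simp

theorem replace_eq (s old new : List Char) (hold : old ≠ []) :
    PySem.Chars.replace s old new = repOne old new s := by
  rw [PySem.Chars.replace]
  rw [if_neg (by simpa [List.isEmpty_iff] using hold)]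
  simpa using go_eq old new hold s.length s [] le_rfl

theorem Conds_tail {p : List Char × List Char} {T : List (List Char × List Char)}
    (h : Conds (p :: T)) : Conds T := by
  obtain ⟨h1, h2, h3, h4⟩ := h
  exact ⟨fun q hq => h1 q (List.mem_cons_of_mem _ hq),
    h2.of_cons,
    fun a ha b hb => h3 a (List.mem_cons_of_mem _ ha) b (List.mem_cons_of_mem _ hb),
    fun a ha b hb => h4 a (List.mem_cons_of_mem _ ha) b (List.mem_cons_of_mem _ hb)⟩

-- the peeling step: scanning with tag (k,v) in front = replace (k,v) first, then scan the rest
theorem peel (k v : List Char) (T : List (List Char × List Char))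
    (hC : Conds ((k, v) :: T)) :
    ∀ s, scanT ((k, v) :: T) s = scanT T (repOne k v s) := by
  obtain ⟨hshape, hpw, hKO, hVK⟩ := hC
  have hk : k ≠ [] := (hshape (k, v) List.mem_cons_self).1
  have hv : v.head? = some '<' := (hshape (k, v) List.mem_cons_self).2.2
  suffices H : ∀ n (s : List Char), s.length ≤ n →
      scanT ((k, v) :: T) s = scanT T (repOne k v s) from fun s => H s.length s le_rfl
  intro n
  induction n with
  | zero =>
    intro s hs
    have : s = [] := List.eq_nil_of_length_eq_zero (Nat.le_zero.mp hs)
    subst this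
    simp [scanT, repOne_nil]
  | succ n ih =>
    intro s hs
    cases s with
    | nil => simp [scanT, repOne_nil]
    | cons c t =>
      by_cases hks : k.isPrefixOf (c :: t)
      · -- tag (k,v) matches here
        have hksB : (fun p : List Char × List Char => p.1.isPrefixOf (c :: t)) (k, v) = true := hks
        rw [scanT_cons, List.find?_cons_of_pos (p := fun p : List Char × List Char => p.1.isPrefixOf (c :: t)) hksB]
        rw [repOne_cons, if_pos hks]
        rw [scan_copy T v _ (fun q hq j hj =>
          hVK (k, v) List.mem_cons_self q (List.mem_cons_of_mem _ hq) j hj)]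
        show v ++ scanT ((k, v) :: T) (List.drop (k.length - 1) t) =
          v ++ scanT T (repOne k v (List.drop (k.length - 1) t))
        congr 1
        exact ih _ (by simp [List.length_drop] at *; omega)
      · cases hf : T.find? (fun p => p.1.isPrefixOf (c :: t)) with
        | some e =>
          -- some later tag matches here
          obtain ⟨k', v'⟩ := e
          have hpred : k'.isPrefixOf (c :: t) = true := by simpa using List.find?_some hf
          have hmem : (k', v') ∈ T := List.mem_of_find?_eq_some hf
          have hmem' : (k', v') ∈ (k, v) :: T := List.mem_cons_of_mem _ hmem
          obtain ⟨rest, hrest⟩ := (List.isPrefixOf_iff_prefix).mp hpred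
          have hk'ne : k' ≠ [] := (hshape (k', v') hmem').1
          obtain ⟨c', u, rfl⟩ : ∃ c' u, k' = c' :: u := by
            cases k' with
            | nil => exact absurd rfl hk'ne
            | cons a b => exact ⟨a, b, rfl⟩
          rw [List.cons_append] at hrest
          have hc : c' = c := by injection hrest
          subst hc
          have ht : t = u ++ rest := by
            injection hrest with _ h2; exact h2.symm
          -- k matches nowhere in the first |c'::u| positions
          have hnom : ∀ j, j < (c' :: u).length → ¬ k <+: ((c' :: u) ++ rest).drop j := by
            intro j hj hpre
            rcases Nat.eq_zero_or_pos j with h0 | hpos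
            · subst h0
              simp only [List.drop_zero] at hpre
              apply hks
              rw [List.isPrefixOf_iff_prefix, ht]
              simpa using hpre
            · rw [List.drop_append_of_le_length (by omega)] at hpre
              rcases prefix_split hpre with h1 | h2
              · exact (hKO (c' :: u, v') hmem' (k, v) List.mem_cons_self j hj hpos).2 h1
              · exact (hKO (c' :: u, v') hmem' (k, v) List.mem_cons_self j hj hpos).1 h2
          have hrep : repOne k v ((c' :: u) ++ rest) = (c' :: u) ++ repOne k v rest :=
            rep_copy k v (c' :: u) rest hnom
          -- LHS
          rw [scanT_cons, List.find?_cons_of_neg (by simpa using hks), hf]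
          -- RHS
          have hct : (c' :: t) = (c' :: u) ++ rest := by rw [ht, List.cons_append]
          rw [hct, hrep]
          -- find? on the scanned modified string returns the same entry
          have hR : Symmetric (fun p q : List Char × List Char =>
              ¬(p.1 <+: q.1) ∧ ¬(q.1 <+: p.1)) := fun a b h => ⟨h.2, h.1⟩
          have hpwT := hpw.of_cons
          have hsame : ∀ p ∈ T,
              p.1.isPrefixOf ((c' :: u) ++ rest) =
              p.1.isPrefixOf ((c' :: u) ++ repOne k v rest) := by
            intro p hp
            by_cases hpq : p = (c' :: u, v')
            · subst hpq
              have h1 : (c' :: u) <+: (c' :: u) ++ rest := List.prefix_append _ _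
              have h2 : (c' :: u) <+: (c' :: u) ++ repOne k v rest := List.prefix_append _ _
              rw [(List.isPrefixOf_iff_prefix).mpr h1, (List.isPrefixOf_iff_prefix).mpr h2]
            · have hnp := hpwT.forall hR hp hmem hpq
              have hfalse : ∀ Y : List Char, p.1.isPrefixOf ((c' :: u) ++ Y) = false := by
                intro Y
                rw [← Bool.not_eq_true, List.isPrefixOf_iff_prefix]
                intro hpre
                rcases prefix_split hpre with h1 | h2
                · exact hnp.1 h1
                · exact hnp.2 h2
              rw [hfalse, hfalse]
          have hfind2 :
              T.find? (fun p => p.1.isPrefixOf ((c' :: u) ++ repOne k v rest)) =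
                some (c' :: u, v') := by
            rw [← find?_congr' T hsame]
            rw [← hct]
            exact hf
          rw [List.cons_append, scanT_cons]
          rw [show (T.find? fun p => p.1.isPrefixOf (c' :: (u ++ repOne k v rest))) =
              some (c' :: u, v') from by
            rw [← hfind2]; rw [List.cons_append]]
          simp only [List.length_cons, Nat.add_sub_cancel, List.drop_left]
          have hdropL : List.drop u.length t = rest := by
            rw [ht]; exact List.drop_left
          rw [hdropL]
          congr 1
          have hlen : rest.length ≤ n := by
            have := hs
            rw [ht] at this
            simp at this
            omega
          exact ih rest hlen
        | none =>
          -- no tag matches here: copy one character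
          rw [scanT_cons, List.find?_cons_of_neg (by simpa using hks), hf]
          show c :: scanT ((k, v) :: T) t = scanT T (repOne k v (c :: t))
          rw [repOne_cons, if_neg hks]
          have hnone2 :
              T.find? (fun p => p.1.isPrefixOf (c :: repOne k v t)) = none := by
            rw [List.find?_eq_none]
            intro q hq hpre
            have hq1 := hshape q (List.mem_cons_of_mem _ hq)
            have hpre' : q.1 <+: c :: repOne k v t := (List.isPrefixOf_iff_prefix).mp hpre
            have hnq : ¬ q.1 <+: c :: t := by
              have := List.find?_eq_none.mp hf q hq
              rw [List.isPrefixOf_iff_prefix] at this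
              exact this
            rcases repOne_decomp k v hk t with hid | ⟨u, t₂, htu, hrep⟩
            · rw [hid] at hpre'; exact hnq hpre'
            · rw [hrep] at hpre'
              have hpre2 : q.1 <+: (c :: u) ++ (v ++ repOne k v t₂) := by
                simpa using hpre'
              have hcu : (c :: u) <+: (c :: t) := by
                rw [htu]
                exact ⟨k ++ t₂, by simp⟩
              rcases prefix_split hpre2 with h1 | h2
              · exact hnq (h1.trans hcu)
              · obtain ⟨w, hw⟩ := h2
                cases w with
                | nil =>
                  rw [List.append_nil] at hw
                  exact hnq (hw ▸ hcu)
                | cons ch w' =>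
                  have hwpre : (ch :: w') <+: v ++ repOne k v t₂ := by
                    rw [← hw] at hpre2
                    exact (List.prefix_append_right_inj (c :: u)).mp hpre2
                  have hch : ch = '<' := by
                    cases v with
                    | nil => simp at hv
                    | cons vh v2 =>
                      have hvh : vh = '<' := by simpa using hv
                      rw [List.cons_append, List.cons_prefix_cons] at hwpre
                      rw [hwpre.1, hvh]
                  have hmem2 : '<' ∈ q.1.tail := by
                    rw [← hw]
                    simp only [List.cons_append, List.tail_cons, List.mem_append,
                      List.mem_cons]
                    exact Or.inr (Or.inl hch.symm)
                  exact hq1.2.1 hmem2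
          rw [scanT_cons, hnone2]
          show c :: scanT ((k, v) :: T) t = c :: scanT T (repOne k v t)
          congr 1
          exact ih t (by simp at hs; omega)

theorem scan_eq_fold :
    ∀ T : List (List Char × List Char), Conds T →
      ∀ s, scanT T s = T.foldl (fun h p => repOne p.1 p.2 h) s := by
  intro T
  induction T with
  | nil => intro _ s; simp [scanT_nil_table]
  | cons p T ih =>
    intro hC s
    obtain ⟨k, v⟩ := p
    rw [peel k v T hC s, List.foldl_cons]
    exact ih (Conds_tail hC) _

theorem fold_toList :
    ∀ (L : List (String × String)) (s : String), (∀ p ∈ L, p.1.toList ≠ []) →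
      (L.foldl (fun h p => PySem.Str.replace h p.1 p.2) s).toList =
        (L.map (fun p => (p.1.toList, p.2.toList))).foldl
          (fun h p => repOne p.1 p.2 h) s.toList := by
  intro L
  induction L with
  | nil => intro s _; simp
  | cons p L ih =>
    intro s hne
    simp only [List.foldl_cons, List.map_cons]
    rw [ih _ (fun q hq => hne q (List.mem_cons_of_mem _ hq))]
    congr 1
    rw [PySem.Str.toList_replace]
    exact replace_eq _ _ _ (hne p List.mem_cons_self)

-- ---------- B-side: split on '<' ----------

-- prepend a block to the first piece
def preCons (p : List Char) : List (List Char) → List (List Char)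
  | [] => [p]
  | h :: r => (p ++ h) :: r

-- structural version of s.split('<')
def splitLt : List Char → List (List Char)
  | [] => [[]]
  | c :: t => if c = '<' then [] :: splitLt t else preCons [c] (splitLt t)

-- rebuild the string from first chunk + later chunks
def tailJoin (r : List (List Char)) : List Char := r.flatMap (fun ch => '<' :: ch)

theorem splitLt_ne_nil : ∀ s, splitLt s ≠ [] := by
  intro s
  cases s with
  | nil => simp [splitLt]
  | cons c t =>
    simp only [splitLt]
    split_ifs
    · simp
    · cases h : splitLt t <;> simp [preCons]

theorem preCons_nil_id : ∀ L : List (List Char), L ≠ [] → preCons [] L = L := by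
  intro L hL
  cases L with
  | nil => exact absurd rfl hL
  | cons h r => simp [preCons]

theorem go_zero (l cur : List Char) (acc : List (List Char)) :
    PySem.Chars.splitOn.go ['<'] 0 l cur acc = ((cur.reverse ++ l) :: acc).reverse := rfl

theorem go_succ_nil (f : Nat) (cur : List Char) (acc : List (List Char)) :
    PySem.Chars.splitOn.go ['<'] (f+1) [] cur acc = (cur.reverse :: acc).reverse := rfl

theorem go_succ_cons (f : Nat) (c : Char) (t cur : List Char) (acc : List (List Char)) :
    PySem.Chars.splitOn.go ['<'] (f+1) (c :: t) cur acc =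
      if (['<'] : List Char).isPrefixOf (c :: t) then
        PySem.Chars.splitOn.go ['<'] f t [] (cur.reverse :: acc)
      else PySem.Chars.splitOn.go ['<'] f t (c :: cur) acc := rfl

theorem splitOn_go_eq :
    ∀ (fuel : Nat) (l cur : List Char) (acc : List (List Char)), l.length ≤ fuel →
      PySem.Chars.splitOn.go ['<'] fuel l cur acc =
        acc.reverse ++ preCons cur.reverse (splitLt l) := by
  intro fuel
  induction fuel with
  | zero =>
    intro l cur acc hl
    have : l = [] := List.eq_nil_of_length_eq_zero (Nat.le_zero.mp hl)
    subst this
    rw [go_zero]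
    simp [splitLt, preCons]
  | succ f ih =>
    intro l cur acc hl
    cases l with
    | nil =>
      rw [go_succ_nil]
      simp [splitLt, preCons]
    | cons c t =>
      rw [go_succ_cons]
      by_cases hc : c = '<'
      · subst hc
        rw [if_pos (by simp [List.isPrefixOf])]
        rw [ih _ _ _ (by simp at hl ⊢; omega)]
        rw [show splitLt ('<' :: t) = [] :: splitLt t by simp [splitLt]]
        simp only [List.reverse_nil]
        rw [preCons_nil_id _ (splitLt_ne_nil t)]
        simp [preCons]
      · rw [if_neg (by simp [List.isPrefixOf]; intro h; exact absurd h.symm hc)]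
        rw [ih _ _ _ (by simp at hl ⊢; omega)]
        rw [show splitLt (c :: t) = preCons [c] (splitLt t) by simp [splitLt, hc]]
        cases h : splitLt t with
        | nil => exact absurd h (splitLt_ne_nil t)
        | cons hd r => simp [preCons]

theorem splitOn_eq_splitLt (s : List Char) :
    PySem.Chars.splitOn s ['<'] = splitLt s := by
  rw [PySem.Chars.splitOn]
  rw [splitOn_go_eq (s.length + 1) s [] [] (by omega)]
  simp only [List.reverse_nil]
  rw [preCons_nil_id _ (splitLt_ne_nil s)]
  simp

theorem splitLt_nolt : ∀ s, ∀ ch ∈ splitLt s, '<' ∉ ch := by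
  intro s
  induction s with
  | nil => intro ch hch; simp [splitLt] at hch; simp [hch]
  | cons c t ih =>
    intro ch hch
    by_cases hc : c = '<'
    · subst hc
      rw [show splitLt ('<' :: t) = [] :: splitLt t by simp [splitLt]] at hch
      rcases List.mem_cons.mp hch with rfl | h
      · simp
      · exact ih ch h
    · rw [show splitLt (c :: t) = preCons [c] (splitLt t) by simp [splitLt, hc]] at hch
      cases h : splitLt t with
      | nil => exact absurd h (splitLt_ne_nil t)
      | cons hd r =>
        rw [h] at hch
        simp only [preCons, List.mem_cons] at hch
        rcases hch with rfl | hmem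
        · intro hm
          rcases List.mem_cons.mp (by simpa using hm) with rfl | hm2
          · exact hc rfl
          · exact ih hd (h ▸ List.mem_cons_self) hm2
        · exact ih ch (h ▸ List.mem_cons_of_mem _ hmem)

theorem splitLt_join : ∀ s, ∃ first rest, splitLt s = first :: rest ∧ s = first ++ tailJoin rest := by
  intro s
  induction s with
  | nil => exact ⟨[], [], rfl, rfl⟩
  | cons c t ih =>
    obtain ⟨f, r, hsp, hj⟩ := ih
    by_cases hc : c = '<'
    · subst hc
      refine ⟨[], f :: r, by simp [splitLt, hsp], ?_⟩
      simp [tailJoin, hj, List.flatMap_cons]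
    · refine ⟨c :: f, r, ?_, by simp [hj]⟩
      simp [splitLt, hc, hsp, preCons]

-- the full-tag table is the chunk table with '<' restored
theorem full_table_eq :
    pyReplacements.map (fun p => (p.1.toList, p.2.toList)) =
      altTable.map (fun p => ('<' :: p.1, p.2)) := by
  decide

-- every key of altTable is '<'-free
theorem altTable_nolt : ∀ p ∈ altTable, '<' ∉ p.1 := by decide

-- matching a full tag at a '<' = matching its body against the chunk alone
theorem pred_eq (k ch X : List Char) (hk : '<' ∉ k)
    (hX : X = [] ∨ ∃ X', X = '<' :: X') :
    ('<' :: k).isPrefixOf ('<' :: (ch ++ X)) = k.isPrefixOf ch := by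
  rw [Bool.eq_iff_iff, List.isPrefixOf_iff_prefix, List.isPrefixOf_iff_prefix,
    List.cons_prefix_cons]
  constructor
  · rintro ⟨-, hpre⟩
    rcases prefix_split hpre with h1 | h2
    · exact h1
    · obtain ⟨w, hw⟩ := h2
      cases w with
      | nil => rw [List.append_nil] at hw; exact hw ▸ List.prefix_rfl
      | cons d w' =>
        have hd : d = '<' := by
          rcases hX with rfl | ⟨X', rfl⟩
          · exfalso
            rw [List.append_nil] at hpre
            have h1 := hpre.length_le
            rw [← hw] at h1
            simp at h1
          · have h2 : (d :: w') <+: ('<' :: X') := by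
              rw [← hw] at hpre
              exact (List.prefix_append_right_inj ch).mp hpre
            exact (List.cons_prefix_cons.mp h2).1
        exact absurd (show '<' ∈ k by rw [← hw]; simp [hd]) hk
  · intro h1
    exact ⟨rfl, h1.trans (List.prefix_append _ _)⟩

-- a table whose keys all start with '<' copies a '<'-free block
theorem scan_copy_nolt (T : List (List Char × List Char))
    (hT : ∀ p ∈ T, ∃ k', p.1 = '<' :: k') :
    ∀ (u Y : List Char), '<' ∉ u → scanT T (u ++ Y) = u ++ scanT T Y := by
  intro u
  induction u with
  | nil => intro Y _; simp
  | cons c u' ih =>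
    intro Y hu
    have hc : c ≠ '<' := by intro h; exact hu (by simp [h])
    have hnone : T.find? (fun p => p.1.isPrefixOf (c :: (u' ++ Y))) = none := by
      rw [List.find?_eq_none]
      intro q hq hpre
      obtain ⟨k', hk'⟩ := hT q hq
      rw [hk', List.isPrefixOf_iff_prefix, List.cons_prefix_cons] at hpre
      exact hc hpre.1.symm
    rw [List.cons_append, scanT_cons, hnone,
      ih Y (fun h => hu (List.mem_cons_of_mem _ h))]
    simp

-- scanning the glued-back later chunks = classifying each chunk
theorem scan_chunks :
    ∀ rest : List (List Char), (∀ ch ∈ rest, '<' ∉ ch) →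
      scanT (altTable.map (fun p => ('<' :: p.1, p.2))) (tailJoin rest) =
        (rest.map classifyChunk).flatten := by
  have hT : ∀ p ∈ altTable.map (fun p => ('<' :: p.1, p.2)), ∃ k', p.1 = '<' :: k' := by
    intro p hp
    obtain ⟨q, -, rfl⟩ := List.mem_map.mp hp
    exact ⟨q.1, rfl⟩
  intro rest
  induction rest with
  | nil => simp [tailJoin, scanT]
  | cons ch rest' ih =>
    intro hfree
    have hch : '<' ∉ ch := hfree ch List.mem_cons_self
    have hX : tailJoin rest' = [] ∨ ∃ X', tailJoin rest' = '<' :: X' := by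
      cases rest' with
      | nil => exact Or.inl rfl
      | cons a r => exact Or.inr ⟨a ++ tailJoin r, by simp [tailJoin, List.flatMap_cons]⟩
    have hjoin : tailJoin (ch :: rest') = '<' :: (ch ++ tailJoin rest') := by
      simp [tailJoin, List.flatMap_cons]
    rw [hjoin, scanT_cons]
    rw [List.find?_map]
    have hpredeq :
        altTable.find?
            ((fun p : List Char × List Char => p.1.isPrefixOf ('<' :: (ch ++ tailJoin rest'))) ∘
              (fun p : List Char × List Char => ('<' :: p.1, p.2))) =
          altTable.find? (fun p => PySem.Chars.startswith ch p.1) := by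
      apply find?_congr'
      intro p hp
      show ('<' :: p.1).isPrefixOf ('<' :: (ch ++ tailJoin rest')) = _
      rw [pred_eq p.1 ch (tailJoin rest') (altTable_nolt p hp) hX]
      rw [Bool.eq_iff_iff, List.isPrefixOf_iff_prefix, PySem.Chars.startswith_iff]
    rw [hpredeq]
    cases hf : altTable.find? (fun p => PySem.Chars.startswith ch p.1) with
    | some p =>
      have hmem : p ∈ altTable := List.mem_of_find?_eq_some hf
      have hkpre : p.1 <+: ch := by
        have := List.find?_some hf
        rwa [PySem.Chars.startswith_iff] at this
      simp only [Option.map_some]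
      have hlen : p.1.length ≤ ch.length := hkpre.length_le
      rw [show ('<' :: p.1).length - 1 = p.1.length by simp]
      rw [List.drop_append_of_le_length hlen]
      rw [scan_copy_nolt _ hT _ _ (fun h => hch (List.mem_of_mem_drop h))]
      rw [ih (fun c hc => hfree c (List.mem_cons_of_mem _ hc))]
      simp [classifyChunk, hf, PySem.List.slice_from]
    | none =>
      simp only [Option.map_none]
      rw [scan_copy_nolt _ hT _ _ hch]
      rw [ih (fun c hc => hfree c (List.mem_cons_of_mem _ hc))]
      simp [classifyChunk, hf]

-- Source B's append-into-parts loop is first chunk ++ classified chunks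
theorem foldl_classify (rest : List (List Char)) :
    ∀ first : List Char,
      rest.foldl (fun parts chunk => parts ++ classifyChunk chunk) first =
        first ++ (rest.map classifyChunk).flatten := by
  induction rest with
  | nil => intro first; simp
  | cons ch r ih => intro first; simp [List.foldl_cons, ih]

-- B computes the single scan over the full-tag table
theorem alt_eq_scan (s : String) :
    (mjml_to_html_py_alt s).toList =
      scanT (pyReplacements.map (fun p => (p.1.toList, p.2.toList))) s.toList := by
  obtain ⟨first, rest, hsp, hj⟩ := splitLt_join s.toList
  rw [mjml_to_html_py_alt, splitOn_eq_splitLt, hsp]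
  simp only
  rw [String.toList_ofList, foldl_classify]
  rw [full_table_eq]
  conv_rhs => rw [hj]
  rw [scan_copy_nolt _ (by
      intro p hp
      obtain ⟨q, -, rfl⟩ := List.mem_map.mp hp
      exact ⟨q.1, rfl⟩)
    first (tailJoin rest) (splitLt_nolt s.toList first (hsp ▸ List.mem_cons_self))]
  rw [scan_chunks rest (fun ch hch => splitLt_nolt s.toList ch (hsp ▸ List.mem_cons_of_mem _ hch))]

-- ===== VERDICT (by name: the statement is the Claim_ definition above) =====
theorem mjml_to_html_py_spec : Claim_equal_mjml_to_html_py := by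
  intro s _
  show mjml_to_html_py s = mjml_to_html_py_alt s
  apply String.toList_inj.mp
  rw [mjml_to_html_py, alt_eq_scan]
  rw [fold_toList pyReplacements s (by decide)]
  rw [scan_eq_fold _ (show Conds _ by unfold Conds; decide) s.toList]
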